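-- pv_equiv track=rewrite | github.com/Harsheel12/Barcode-Scanner | barcode_scanner.py | RepeatedBorderBoundaryPadding
-- ===== SOURCE A (Python) =====
-- def RepeatedBorderBoundaryPadding(new, old, image_width, image_height):
--     padded_width = image_width + 2
--     padded_height = image_height + 2
--
--     for row in range(image_height):
--         for col in range(image_width):
--             new[row + 1][col + 1] = old[row][col]
--
--     top_row = old[0]
--     bottom_row = old[image_height - 1]
--     left_column = [old[i][0] for i in range(image_height)]
--     right_column = [old[i][image_width - 1] for i in range(image_height)]
--
--     new[0] = [old[0][0]] + top_row + [old[0][image_width - 1]]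
--     new[padded_height - 1] = [old[image_height - 1][0]] + bottom_row + [old[image_height - 1][image_width - 1]]
--
--     for i in range(image_height):
--         new[i + 1][0] = left_column[i]
--         new[i + 1][padded_width - 1] = right_column[i]
--
--     return new
-- ===== SOURCE B (Python) =====
-- # B: one fused per-row pass with clamped column indices replaces A's three separate
-- # passes (full-grid interior copy, left/right column list comprehensions, side-column
-- # loop); the two boundary rows are built directly. Mutates `new` in place like A.
-- def RepeatedBorderBoundaryPadding(new, old, image_width, image_height):
--     w_limit = image_width - 1
--     for i in range(image_height):
--         row = new[i + 1]
--         src = old[i]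
--         for c in range(image_width + 2):
--             row[c] = src[min(max(c - 1, 0), w_limit)]
--     new[0] = [old[0][0]] + old[0] + [old[0][image_width - 1]]
--     new[image_height + 1] = [old[image_height - 1][0]] + old[image_height - 1] + [old[image_height - 1][image_width - 1]]
--     return new
-- ===== Notes on version B (the rewrite author's own statement) =====
-- stated objective: simpler
-- what changed: Replaces A's three separate passes (full-grid interior copy, left/right column list comprehensions plus a second row loop writing the side columns) with one fused per-row loop writing new[i+1][c] = old[i][clamp(c-1)] via a clamped column index, building the two boundary rows directly.
import Mathlib
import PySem

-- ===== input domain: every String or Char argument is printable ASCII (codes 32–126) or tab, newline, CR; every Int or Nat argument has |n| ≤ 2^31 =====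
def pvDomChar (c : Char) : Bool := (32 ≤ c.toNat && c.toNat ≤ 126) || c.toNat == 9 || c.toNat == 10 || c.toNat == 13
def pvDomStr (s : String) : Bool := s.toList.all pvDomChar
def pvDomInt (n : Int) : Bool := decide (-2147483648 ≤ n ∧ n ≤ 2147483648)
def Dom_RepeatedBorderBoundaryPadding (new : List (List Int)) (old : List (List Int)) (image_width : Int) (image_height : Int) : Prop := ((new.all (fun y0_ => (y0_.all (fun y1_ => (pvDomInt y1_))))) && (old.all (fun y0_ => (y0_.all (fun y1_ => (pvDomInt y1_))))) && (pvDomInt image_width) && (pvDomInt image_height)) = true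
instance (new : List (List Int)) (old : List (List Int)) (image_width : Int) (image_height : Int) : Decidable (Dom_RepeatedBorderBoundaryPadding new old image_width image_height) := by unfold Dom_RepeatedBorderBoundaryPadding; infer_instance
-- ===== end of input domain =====

-- B fuses A's three passes into one clamped per-row loop; the boundary rows are built by the
-- same one-line concatenations. Both programs mutate `new` in place; equivalence here is about
-- the RETURN value (A and B write the same cells, so the visible mutation agrees as well).

-- ===== PORT A =====
-- m[i] with a default (Python raises instead; exact under Pre_, where every index is in range)
def pvRow (m : List (List Int)) (i : Int) : List Int := PySem.List.pyGetD m i []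
-- old[i][j] (exact under Pre_: both indices in range there)
def pvCell (m : List (List Int)) (i j : Int) : Int := PySem.List.pyGetD (pvRow m i) j 0
-- Python 'm[i][j] = v': read row i, set element j, store the row back (exact under Pre_)
def pvSetCell (m : List (List Int)) (i j : Int) (v : Int) : List (List Int) :=
  PySem.List.pySetD m i (PySem.List.pySetD (pvRow m i) j v)

def RepeatedBorderBoundaryPadding (new : List (List Int)) (old : List (List Int)) (image_width : Int) (image_height : Int) : List (List Int) :=
  let padded_width := image_width + 2
  let padded_height := image_height + 2
  -- for row in range(image_height): for col in range(image_width): new[row+1][col+1] = old[row][col]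
  let new1 := (PySem.List.pyRange 0 image_height 1).foldl (fun acc row =>
      (PySem.List.pyRange 0 image_width 1).foldl (fun acc2 col =>
        pvSetCell acc2 (row + 1) (col + 1) (pvCell old row col)) acc) new
  let top_row := pvRow old 0
  let bottom_row := pvRow old (image_height - 1)
  let left_column := (PySem.List.pyRange 0 image_height 1).map (fun i => pvCell old i 0)
  let right_column := (PySem.List.pyRange 0 image_height 1).map (fun i => pvCell old i (image_width - 1))
  let new2 := PySem.List.pySetD new1 0 ([pvCell old 0 0] ++ top_row ++ [pvCell old 0 (image_width - 1)])
  let new3 := PySem.List.pySetD new2 (padded_height - 1)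
      ([pvCell old (image_height - 1) 0] ++ bottom_row ++ [pvCell old (image_height - 1) (image_width - 1)])
  -- for i in range(image_height): new[i+1][0] = left_column[i]; new[i+1][padded_width-1] = right_column[i]
  (PySem.List.pyRange 0 image_height 1).foldl (fun acc i =>
    pvSetCell (pvSetCell acc (i + 1) 0 (PySem.List.pyGetD left_column i 0))
      (i + 1) (padded_width - 1) (PySem.List.pyGetD right_column i 0)) new3

-- ===== PORT B =====
def RepeatedBorderBoundaryPadding_alt (new : List (List Int)) (old : List (List Int)) (image_width : Int) (image_height : Int) : List (List Int) :=
  let w_limit := image_width - 1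
  -- for i in range(image_height): row = new[i+1]; src = old[i];
  --   for c in range(image_width + 2): row[c] = src[min(max(c - 1, 0), w_limit)]
  let new1 := (PySem.List.pyRange 0 image_height 1).foldl (fun acc i =>
      (PySem.List.pyRange 0 (image_width + 2) 1).foldl (fun acc2 c =>
        pvSetCell acc2 (i + 1) c (pvCell old i (min (max (c - 1) 0) w_limit))) acc) new
  let new2 := PySem.List.pySetD new1 0
      ([pvCell old 0 0] ++ pvRow old 0 ++ [pvCell old 0 (image_width - 1)])
  PySem.List.pySetD new2 (image_height + 1)
      ([pvCell old (image_height - 1) 0] ++ pvRow old (image_height - 1) ++ [pvCell old (image_height - 1) (image_width - 1)])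

-- ===== PRECONDITION & SPEC =====
-- Pre_: exactly the inputs on which A returns normally, EXCEPT image_height >= 1 with
-- image_width <= 0, where A returns a value assembled through Python negative-index
-- wraparound on a zero/negative-width image -- an accidental corner no caller would specify
-- (B clamps there instead).  For image_height >= 1 this is the usual buffer/image shape;
-- for image_height <= 0 both loops are empty and only the two boundary-row assignments run,
-- so Pre_ is exactly the in-range conditions of the indexings A performs.
def Pre_RepeatedBorderBoundaryPadding (new : List (List Int)) (old : List (List Int)) (image_width : Int) (image_height : Int) : Prop :=
  (1 ≤ image_height ∧ 1 ≤ image_width ∧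
    image_height.toNat + 2 ≤ new.length ∧
    image_height.toNat ≤ old.length ∧
    (∀ i, i < image_height.toNat →
      image_width.toNat + 2 ≤ (new.getD (i + 1) []).length ∧
      image_width.toNat ≤ (old.getD i []).length)) ∨
  (image_height ≤ 0 ∧
    old ≠ [] ∧ new ≠ [] ∧
    PySem.Raise.InRange old.length (image_height - 1) ∧
    PySem.Raise.InRange new.length (image_height + 1) ∧
    (old.getD 0 []) ≠ [] ∧
    PySem.Raise.InRange (old.getD 0 []).length (image_width - 1) ∧
    (old.getD (image_height - 1 + old.length).toNat []) ≠ [] ∧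
    PySem.Raise.InRange (old.getD (image_height - 1 + old.length).toNat []).length (image_width - 1))
instance (new : List (List Int)) (old : List (List Int)) (image_width : Int) (image_height : Int) : Decidable (Pre_RepeatedBorderBoundaryPadding new old image_width image_height) := by unfold Pre_RepeatedBorderBoundaryPadding; infer_instance

def pvWitness_RepeatedBorderBoundaryPadding : List (List Int) × List (List Int) × Int × Int :=
  ([[0, 0, 0], [0, 0, 0], [0, 0, 0]], [[5]], 1, 1)

def Spec_RepeatedBorderBoundaryPadding (new : List (List Int)) (old : List (List Int)) (image_width : Int) (image_height : Int) (out : List (List Int)) : Prop := out = RepeatedBorderBoundaryPadding_alt new old image_width image_height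
instance (new : List (List Int)) (old : List (List Int)) (image_width : Int) (image_height : Int) (out : List (List Int)) : Decidable (Spec_RepeatedBorderBoundaryPadding new old image_width image_height out) := by unfold Spec_RepeatedBorderBoundaryPadding; infer_instance

-- ===== CLAIM (what is proved, stated in full; the proofs are below) =====
def Claim_equal_RepeatedBorderBoundaryPadding : Prop := ∀ (new : List (List Int)) (old : List (List Int)) (image_width : Int) (image_height : Int), Dom_RepeatedBorderBoundaryPadding new old image_width image_height → Pre_RepeatedBorderBoundaryPadding new old image_width image_height → Spec_RepeatedBorderBoundaryPadding new old image_width image_height (RepeatedBorderBoundaryPadding new old image_width image_height)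

-- ===== LEMMAS AND PROOFS =====
-- ---- proof-only helpers: a Nat-indexed model of cell reads/writes ----
def cellN (m : List (List Int)) (i j : Nat) : Int := (m.getD i []).getD j 0

def writeN (m : List (List Int)) (i j : Nat) (v : Int) : List (List Int) :=
  m.set i ((m.getD i []).set j v)

theorem getD_set {α : Type} (l : List α) (i j : Nat) (v d : α) :
    (l.set i v).getD j d = if j = i ∧ i < l.length then v else l.getD j d := by
  simp only [List.getD, List.getElem?_set]
  split_ifs with h1 h2 h3 <;> simp_all

theorem getD_writeN (m : List (List Int)) (i j : Nat) (v : Int) (k : Nat) :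
    (writeN m i j v).getD k [] = if k = i then (m.getD i []).set j v else m.getD k [] := by
  rw [writeN, getD_set]
  by_cases hk : k = i
  · subst hk
    by_cases hi : k < m.length
    · simp [hi]
    · have h0 : m.getD k [] = [] := by
        have : m[k]? = none := by rw [List.getElem?_eq_none_iff]; omega
        simp [List.getD, this]
      simp [hi]
  · simp [hk]

theorem writeN_writeN_same (m : List (List Int)) (i j1 j2 : Nat) (v1 v2 : Int) :
    writeN (writeN m i j1 v1) i j2 v2 = m.set i (((m.getD i []).set j1 v1).set j2 v2) := by
  show (writeN m i j1 v1).set i (((writeN m i j1 v1).getD i []).set j2 v2) = _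
  rw [getD_writeN, if_pos rfl]
  simp [writeN, List.set_set]

-- a loop of writes to ONE row i equals setting that row to the folded row
theorem foldl_writeN_row (g : Nat → Nat) (f : Nat → Int) (i : Nat) :
    ∀ (n : Nat) (m : List (List Int)),
    (List.range n).foldl (fun acc c => writeN acc i (g c) (f c)) m =
      m.set i ((List.range n).foldl (fun row c => row.set (g c) (f c)) (m.getD i [])) := by
  intro n
  induction n with
  | zero =>
    intro m
    by_cases hi : i < m.length
    · simp [List.getD, List.getElem?_eq_getElem hi, List.set_getElem_self hi]
    · simp [List.set_eq_of_length_le (by omega : m.length ≤ i)]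
  | succ n ih =>
    intro m
    rw [List.range_succ, List.foldl_append, List.foldl_append, ih]
    simp only [List.foldl_cons, List.foldl_nil]
    by_cases hi : i < m.length
    · have h : (m.set i ((List.range n).foldl (fun row c => row.set (g c) (f c)) (m.getD i []))).getD i []
          = (List.range n).foldl (fun row c => row.set (g c) (f c)) (m.getD i []) := by
        rw [getD_set]; simp [hi]
      show (m.set i _).set i (((m.set i _).getD i []).set (g n) (f n)) = _
      rw [h, List.set_set]
    · have hms : ∀ r : List Int, m.set i r = m := fun r => List.set_eq_of_length_le (by omega)
      simp [hms, writeN]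

theorem setFold_length (f : Nat → Int) (off : Nat) (n : Nat) (row : List Int) :
    ((List.range n).foldl (fun acc c => acc.set (c + off) (f c)) row).length = row.length := by
  induction n with
  | zero => rfl
  | succ n ih => rw [List.range_succ, List.foldl_append]; simp [ih]

-- characterization of a single-row write loop at offset positions
theorem setFold_getD (f : Nat → Int) (off : Nat) :
    ∀ (n : Nat) (row : List Int) (j : Nat),
    ((List.range n).foldl (fun acc c => acc.set (c + off) (f c)) row).getD j 0 =
      if off ≤ j ∧ j < n + off ∧ j < row.length then f (j - off) else row.getD j 0 := by
  intro n
  induction n with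
  | zero => intro row j; simp; intro h1 h2 h3; omega
  | succ n ih =>
    intro row j
    rw [List.range_succ, List.foldl_append]
    simp only [List.foldl_cons, List.foldl_nil]
    rw [getD_set, setFold_length, ih]
    split_ifs with h1 h2 h3 h4 h5 <;> first
      | rfl
      | omega
      | (congr 1; omega)

-- characterization of an outer loop that replaces row r+off using the current row
theorem outerFold_length (F : Nat → List Int → List Int) (off : Nat) (n : Nat) (m : List (List Int)) :
    ((List.range n).foldl (fun acc r => acc.set (r + off) (F r (acc.getD (r + off) []))) m).length = m.length := by
  induction n with
  | zero => rfl
  | succ n ih =>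
    rw [List.range_succ, List.foldl_append]
    simp only [List.foldl_cons, List.foldl_nil, List.length_set]
    exact ih

theorem outerFold_getD (F : Nat → List Int → List Int) (off : Nat) (n : Nat) (m : List (List Int)) :
    ∀ (k : Nat),
    ((List.range n).foldl (fun acc r => acc.set (r + off) (F r (acc.getD (r + off) []))) m).getD k [] =
      if off ≤ k ∧ k < n + off ∧ k < m.length then F (k - off) (m.getD k []) else m.getD k [] := by
  induction n with
  | zero => intro k; simp; intro h1 h2 h3; omega
  | succ n ih =>
    intro k
    rw [List.range_succ, List.foldl_append]
    simp only [List.foldl_cons, List.foldl_nil]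
    rw [getD_set, outerFold_length, ih k, ih (n + off)]
    by_cases h1 : k = n + off ∧ n + off < m.length
    · obtain ⟨hk, hlt⟩ := h1
      subst hk
      rw [if_pos ⟨rfl, hlt⟩, if_neg (by omega), if_pos (by omega)]
      congr 1
      omega
    · rw [if_neg h1]
      by_cases h2 : off ≤ k ∧ k < n + off ∧ k < m.length
      · rw [if_pos h2, if_pos (by omega)]
      · rw [if_neg h2, if_neg (by omega)]

theorem list_eq_of_getD (a b : List (List Int)) (hlen : a.length = b.length)
    (h : ∀ k, k < a.length → a.getD k [] = b.getD k []) : a = b := by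
  apply List.ext_getElem hlen
  intro k h1 h2
  have hk := h k h1
  simpa [List.getD, List.getElem?_eq_getElem, h1, h2] using hk

theorem row_eq_of_getD (a b : List Int) (hlen : a.length = b.length)
    (h : ∀ j, j < a.length → a.getD j 0 = b.getD j 0) : a = b := by
  apply List.ext_getElem hlen
  intro j h1 h2
  have hj := h j h1
  simpa [List.getD, List.getElem?_eq_getElem, h1, h2] using hj

-- ---- cast bridges between the ports' Int-indexed primitives and the Nat model ----
theorem pyRange_cast (n : Nat) :
    PySem.List.pyRange 0 (n : Int) 1 = (List.range n).map (fun k : Nat => (k : Int)) := by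
  rw [PySem.List.pyRange_one]
  have h : ((n : Int) - 0).toNat = n := by omega
  rw [h]
  exact List.map_congr_left (fun a _ => by simp)

theorem pvRow_cast (m : List (List Int)) (i : Nat) : pvRow m (i : Int) = m.getD i [] := by
  simp [pvRow]

theorem pvRow_zero (m : List (List Int)) : pvRow m 0 = m.getD 0 [] := by
  simpa using pvRow_cast m 0

theorem pvCell_cast (m : List (List Int)) (i j : Nat) : pvCell m (i : Int) (j : Int) = cellN m i j := by
  simp [pvCell, pvRow, cellN]

theorem pvCell_c00 (m : List (List Int)) : pvCell m 0 0 = cellN m 0 0 := by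
  simpa using pvCell_cast m 0 0

theorem pvCell_ci0 (m : List (List Int)) (i : Nat) : pvCell m (i : Int) 0 = cellN m i 0 := by
  simpa using pvCell_cast m i 0

theorem pvCell_c0j (m : List (List Int)) (j : Nat) : pvCell m 0 (j : Int) = cellN m 0 j := by
  simpa using pvCell_cast m 0 j

theorem pvSetCell_cast (m : List (List Int)) (i j : Nat) (v : Int) :
    pvSetCell m (i : Int) (j : Int) v = writeN m i j v := by
  simp [pvSetCell, pvRow, writeN]

theorem pvSetCell_s1 (m : List (List Int)) (r c : Nat) (v : Int) :
    pvSetCell m ((r : Int) + 1) ((c : Int) + 1) v = writeN m (r + 1) (c + 1) v := by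
  have h := pvSetCell_cast m (r + 1) (c + 1) v
  push_cast at h
  exact h

theorem pvSetCell_s1' (m : List (List Int)) (r c : Nat) (v : Int) :
    pvSetCell m ((r : Int) + 1) (c : Int) v = writeN m (r + 1) c v := by
  have h := pvSetCell_cast m (r + 1) c v
  push_cast at h
  exact h

theorem pvSetCell_s2 (m : List (List Int)) (r : Nat) (v : Int) :
    pvSetCell m ((r : Int) + 1) 0 v = writeN m (r + 1) 0 v := by
  have h := pvSetCell_cast m (r + 1) 0 v
  push_cast at h
  exact h

theorem pySetD_zero (xs : List (List Int)) (v : List Int) :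
    PySem.List.pySetD xs 0 v = xs.set 0 v := by
  simpa using PySem.List.pySetD_natCast xs (n := 0) v


-- ---- Nat-level models (proof-only) ----
def lcol (old : List (List Int)) (H : Nat) : List Int := (List.range H).map (fun i => cellN old i 0)
def rcol (old : List (List Int)) (W H : Nat) : List Int := (List.range H).map (fun i => cellN old i (W - 1))
def padTop (old : List (List Int)) (W : Nat) : List Int :=
  cellN old 0 0 :: (old.getD 0 [] ++ [cellN old 0 (W - 1)])
def padBot (old : List (List Int)) (W H : Nat) : List Int :=
  cellN old (H - 1) 0 :: (old.getD (H - 1) [] ++ [cellN old (H - 1) (W - 1)])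

def modelA (new old : List (List Int)) (W H : Nat) : List (List Int) :=
  let new1 := (List.range H).foldl (fun acc r =>
      (List.range W).foldl (fun acc2 c => writeN acc2 (r + 1) (c + 1) (cellN old r c)) acc) new
  let new3 := (new1.set 0 (padTop old W)).set (H + 1) (padBot old W H)
  (List.range H).foldl (fun acc i =>
    writeN (writeN acc (i + 1) 0 ((lcol old H).getD i 0)) (i + 1) (W + 1) ((rcol old W H).getD i 0)) new3

def modelB (new old : List (List Int)) (W H : Nat) : List (List Int) :=
  let new1 := (List.range H).foldl (fun acc i =>
      (List.range (W + 2)).foldl (fun acc2 c =>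
        writeN acc2 (i + 1) c (cellN old i (min (c - 1) (W - 1)))) acc) new
  (new1.set 0 (padTop old W)).set (H + 1) (padBot old W H)
-- canonical loop forms
def setF (f : Nat → Int) (off n : Nat) (row : List Int) : List Int :=
  (List.range n).foldl (fun acc c => acc.set (c + off) (f c)) row

def outerF (F : Nat → List Int → List Int) (off n : Nat) (m : List (List Int)) : List (List Int) :=
  (List.range n).foldl (fun acc r => acc.set (r + off) (F r (acc.getD (r + off) []))) m

theorem setF_length (f : Nat → Int) (off n : Nat) (row : List Int) :
    (setF f off n row).length = row.length := setFold_length f off n row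

theorem setF_getD (f : Nat → Int) (off n : Nat) (row : List Int) (j : Nat) :
    (setF f off n row).getD j 0 =
      if off ≤ j ∧ j < n + off ∧ j < row.length then f (j - off) else row.getD j 0 :=
  setFold_getD f off n row j

theorem outerF_length (F : Nat → List Int → List Int) (off n : Nat) (m : List (List Int)) :
    (outerF F off n m).length = m.length := outerFold_length F off n m

theorem outerF_getD (F : Nat → List Int → List Int) (off n : Nat) (m : List (List Int)) (k : Nat) :
    (outerF F off n m).getD k [] =
      if off ≤ k ∧ k < n + off ∧ k < m.length then F (k - off) (m.getD k []) else m.getD k [] :=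
  outerFold_getD F off n m k

-- interior rows: A's three-phase writes agree with the clamped write loop
theorem interiorRow_eq (old : List (List Int)) (W H r : Nat) (row : List Int)
    (hW1 : 1 ≤ W) (hrH : r < H) :
    ((setF (fun c => cellN old r c) 1 W row).set 0 ((lcol old H).getD r 0)).set (W + 1)
        ((rcol old W H).getD r 0) =
      setF (fun c => cellN old r (min (c - 1) (W - 1))) 0 (W + 2) row := by
  have hl : (lcol old H).getD r 0 = cellN old r 0 := PySem.List.getD_map_range _ H r 0 hrH
  have hr : (rcol old W H).getD r 0 = cellN old r (W - 1) := PySem.List.getD_map_range _ H r 0 hrH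
  apply row_eq_of_getD
  · simp [setF_length]
  · intro j hj
    simp only [List.length_set, setF_length] at hj
    rw [getD_set, getD_set, setF_getD, setF_getD]
    simp only [List.length_set, setF_length, hl, hr, cellN]
    split_ifs <;> first | rfl | omega | (congr 1; omega)


theorem modelA_eq_modelB (new old : List (List Int)) (W H : Nat) (hW1 : 1 ≤ W) :
    modelA new old W H = modelB new old W H := by
  have eA : modelA new old W H =
      outerF (fun i row => (row.set 0 ((lcol old H).getD i 0)).set (W + 1) ((rcol old W H).getD i 0)) 1 H
        (((outerF (fun r row => setF (fun c => cellN old r c) 1 W row) 1 H new).set 0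
            (padTop old W)).set (H + 1) (padBot old W H)) := by
    unfold modelA outerF setF
    simp only [foldl_writeN_row, writeN_writeN_same]
  have eB : modelB new old W H =
      ((outerF (fun i row => setF (fun c => cellN old i (min (c - 1) (W - 1))) 0 (W + 2) row) 1 H new).set 0
          (padTop old W)).set (H + 1) (padBot old W H) := by
    unfold modelB outerF setF
    simp only [foldl_writeN_row, Nat.add_zero]
  rw [eA, eB]
  have hm3len :
      ((((outerF (fun r row => setF (fun c => cellN old r c) 1 W row) 1 H new).set 0
          (padTop old W)).set (H + 1) (padBot old W H))).length = new.length := by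
    simp [outerF_length]
  apply list_eq_of_getD
  · simp [outerF_length]
  · intro k hk
    simp only [outerF_length, List.length_set] at hk
    simp only [outerF_getD, getD_set, List.length_set, outerF_length]
    split_ifs <;>
      first
        | rfl
        | omega
        | (exact interiorRow_eq old W H (k - 1) (new.getD k []) hW1 (by omega))

-- ---- the ports compute the models (image_height >= 1, image_width >= 1) ----
theorem portA_eq_modelA (new old : List (List Int)) (W H : Nat) (hW1 : 1 ≤ W) (hH1 : 1 ≤ H) :
    RepeatedBorderBoundaryPadding new old (W : Int) (H : Int) = modelA new old W H := by
  have hw1 : ((W : Int) - 1) = ((W - 1 : Nat) : Int) := by omega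
  have hh1 : ((H : Int) - 1) = ((H - 1 : Nat) : Int) := by omega
  have hph : ((H : Int) + 2 - 1) = ((H + 1 : Nat) : Int) := by push_cast; ring
  have hpw : ((W : Int) + 2 - 1) = ((W + 1 : Nat) : Int) := by push_cast; ring
  unfold RepeatedBorderBoundaryPadding modelA lcol rcol padTop padBot
  simp only [hw1, hh1, hph, hpw, pyRange_cast, List.foldl_map, List.map_map, Function.comp_def,
    pvSetCell_s1, pvSetCell_s1', pvSetCell_s2, pvCell_cast, pvCell_c00, pvCell_ci0, pvCell_c0j,
    pvRow_zero, pvRow_cast, pySetD_zero, List.cons_append, List.nil_append,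
    PySem.List.pySetD_natCast, PySem.List.pyGetD_natCast]

theorem portB_eq_modelB (new old : List (List Int)) (W H : Nat) (hW1 : 1 ≤ W) (hH1 : 1 ≤ H) :
    RepeatedBorderBoundaryPadding_alt new old (W : Int) (H : Int) = modelB new old W H := by
  have hcl : ∀ r : Nat,
      (min (max ((r : Int) - 1) 0) (((W - 1 : Nat)) : Int)) = ((min (r - 1) (W - 1) : Nat) : Int) := by
    intro r
    omega
  have hw1 : ((W : Int) - 1) = ((W - 1 : Nat) : Int) := by omega
  have hh1 : ((H : Int) - 1) = ((H - 1 : Nat) : Int) := by omega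
  have hw2 : ((W : Int) + 2) = ((W + 2 : Nat) : Int) := by push_cast; ring
  have hh2 : ((H : Int) + 1) = ((H + 1 : Nat) : Int) := by push_cast; ring
  unfold RepeatedBorderBoundaryPadding_alt modelB padTop padBot
  simp only [hw1, hh1, hw2, hh2, pyRange_cast, List.foldl_map, hcl,
    pvSetCell_s1', pvCell_cast, pvCell_c00, pvCell_ci0, pvCell_c0j, pvRow_zero, pvRow_cast,
    pySetD_zero, List.cons_append, List.nil_append, PySem.List.pySetD_natCast]

-- ---- image_height <= 0: both loops are empty and the two boundary assignments coincide ----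
theorem ports_eq_of_nonpos (new old : List (List Int)) (image_width image_height : Int)
    (hh : image_height ≤ 0) :
    RepeatedBorderBoundaryPadding new old image_width image_height =
      RepeatedBorderBoundaryPadding_alt new old image_width image_height := by
  have hr : PySem.List.pyRange 0 image_height 1 = [] := by
    rw [PySem.List.pyRange_one, show (image_height - 0).toNat = 0 from by omega]
    rfl
  have he : image_height + 2 - 1 = image_height + 1 := by ring
  unfold RepeatedBorderBoundaryPadding RepeatedBorderBoundaryPadding_alt
  simp only [hr, List.foldl_nil, he]

-- ===== VERDICT (by name: the statement is the Claim_ definition above) =====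
theorem RepeatedBorderBoundaryPadding_spec : Claim_equal_RepeatedBorderBoundaryPadding := by
  intro new old w h hdom hpre
  unfold Spec_RepeatedBorderBoundaryPadding
  by_cases hh : 1 ≤ h
  · have hw : 1 ≤ w := by
      rcases hpre with ⟨_, hw, _⟩ | ⟨h0, _⟩
      · exact hw
      · omega
    rw [show w = (w.toNat : Int) from by omega, show h = (h.toNat : Int) from by omega,
      portA_eq_modelA _ _ _ _ (by omega) (by omega),
      portB_eq_modelB _ _ _ _ (by omega) (by omega)]
    exact modelA_eq_modelB _ _ _ _ (by omega)
  · exact ports_eq_of_nonpos new old w h (by omega)
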